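-- pv_equiv track=rewrite | github.com/MKanaar/Advent-of-code-2025 | 02/script2.py | process
-- ===== SOURCE A (Python) =====
-- def process(id_range: tuple[int, int]) -> list[int]:
--     wrong_ids: list[int] = []
--     start, end = id_range
--
--     for id in range(start, end + 1):
--         id_str = str(id)
--         str_length = len(id_str)
--
--         for length in range(1, (str_length // 2) + 1, 1):
--             if str_length % length != 0:
--                 continue
--             motif = id_str[:length]
--             motif_repeated = motif * (str_length // length)
--             if motif_repeated == id_str:
--                 wrong_ids.append(id)
--                 break
--
--     return wrong_ids
-- ===== SOURCE B (Python) =====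
-- def process(id_range: tuple[int, int]) -> list[int]:
--     wrong_ids: list[int] = []
--     start, end = id_range
--     for id in range(start, end + 1):
--         id_str = str(id)
--         if id_str in (id_str + id_str)[1:-1]:
--             wrong_ids.append(id)
--     return wrong_ids
-- ===== Notes on version B (the rewrite author's own statement) =====
-- stated objective: idiomatic
-- what changed: B replaces A's inner loop over all divisor lengths (building motif*k strings and comparing) by the classic doubled-string membership test `s in (s+s)[1:-1]`, which holds exactly when the decimal string is a repeated motif.
import Mathlib
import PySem

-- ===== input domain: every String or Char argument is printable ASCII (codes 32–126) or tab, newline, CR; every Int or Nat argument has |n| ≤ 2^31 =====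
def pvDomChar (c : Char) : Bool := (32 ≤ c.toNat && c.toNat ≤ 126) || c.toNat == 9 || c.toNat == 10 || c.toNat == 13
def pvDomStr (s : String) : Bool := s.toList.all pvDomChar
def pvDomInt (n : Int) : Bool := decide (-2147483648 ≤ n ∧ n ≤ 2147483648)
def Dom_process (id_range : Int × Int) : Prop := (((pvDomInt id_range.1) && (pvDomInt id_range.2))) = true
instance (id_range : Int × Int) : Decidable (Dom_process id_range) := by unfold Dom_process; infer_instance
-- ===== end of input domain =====

-- B replaces A's divisor-length motif loop by the idiomatic doubled-string trick
-- `s in (s+s)[1:-1]` (one substring test per id instead of an inner loop); same return value.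

-- ===== PORT A =====

-- hand port of Python's `str * int` (exact: a non-positive count gives the empty string)
def pyStrMul (s : String) (n : Int) : String :=
  String.ofList (List.replicate n.toNat s.toList).flatten

-- A's inner `for length in range(...)` loop with `continue`/`break`:
-- returns true iff the loop appended (and broke)
def processInner (id_str : String) (str_length : Int) : List Int → Bool
  | [] => false
  | length :: rest =>
    if PySem.Int.mod str_length length ≠ 0 then processInner id_str str_length rest
    else if pyStrMul (PySem.Str.slice id_str none (some length))
              (PySem.Int.floordiv str_length length) = id_str then true
    else processInner id_str str_length rest

def process (id_range : Int × Int) : List Int :=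
  (PySem.List.pyRange id_range.1 (id_range.2 + 1) 1).foldl
    (fun wrong_ids id =>
      let id_str := PySem.Int.toStr id
      let str_length := PySem.Str.len id_str
      if processInner id_str str_length
           (PySem.List.pyRange 1 (PySem.Int.floordiv str_length 2 + 1) 1)
      then wrong_ids ++ [id] else wrong_ids) []

-- ===== PORT B =====
def process_alt (id_range : Int × Int) : List Int :=
  (PySem.List.pyRange id_range.1 (id_range.2 + 1) 1).foldl
    (fun wrong_ids id =>
      let id_str := PySem.Int.toStr id
      if PySem.Str.isIn id_str (PySem.Str.slice (id_str ++ id_str) (some 1) (some (-1)))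
      then wrong_ids ++ [id] else wrong_ids) []

-- ===== PRECONDITION & SPEC =====
def Spec_process (id_range : Int × Int) (out : List Int) : Prop := out = process_alt id_range
instance (id_range : Int × Int) (out : List Int) : Decidable (Spec_process id_range out) := by unfold Spec_process; infer_instance

-- ===== CLAIM (what is proved, stated in full; the proofs are below) =====
def Claim_equal_process : Prop := ∀ (id_range : Int × Int), Dom_process id_range → Spec_process id_range (process id_range)

-- ===== LEMMAS AND PROOFS =====

-- str(id) is never the empty string
lemma toDigitsCore_length_le (b : Nat) : ∀ (f n : Nat) (l : List Char),
    l.length ≤ (Nat.toDigitsCore b f n l).length := by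
  intro f
  induction f with
  | zero => intro n l; simp [Nat.toDigitsCore]
  | succ f ih =>
    intro n l
    simp only [Nat.toDigitsCore]
    split
    · simp
    · exact le_trans (by simp) (ih _ _)

lemma toDigits_ne_nil (b n : Nat) : Nat.toDigits b n ≠ [] := by
  unfold Nat.toDigits Nat.toDigitsCore
  intro h
  dsimp only at h
  split at h
  · simp at h
  · have := toDigitsCore_length_le b n (n / b) [(n % b).digitChar]
    rw [h] at this
    simp at this

lemma toChars_ne_nil (n : Int) : PySem.Int.toChars n ≠ [] := by
  unfold PySem.Int.toChars
  split
  · simp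
  · exact toDigits_ne_nil 10 n.toNat

-- the inner loop is an existence test over the candidate lengths
lemma processInner_iff (s : String) (d : Int) (Ls : List Int) :
    processInner s d Ls = true ↔
      ∃ L ∈ Ls, PySem.Int.mod d L = 0 ∧
        pyStrMul (PySem.Str.slice s none (some L)) (PySem.Int.floordiv d L) = s := by
  induction Ls with
  | nil => simp [processInner]
  | cons L rest ih =>
    simp only [processInner]
    split
    · rename_i hm
      simp only [ih, List.mem_cons]
      constructor
      · rintro ⟨L', h1, h2⟩; exact ⟨L', Or.inr h1, h2⟩
      · rintro ⟨L', h1, h2⟩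
        rcases h1 with rfl | h1
        · exact absurd h2.1 hm
        · exact ⟨L', h1, h2⟩
    · rename_i hm
      rw [ne_eq, not_not] at hm
      split
      · rename_i he
        simp only [true_iff]
        exact ⟨L, List.mem_cons_self, hm, he⟩
      · rename_i he
        simp only [ih, List.mem_cons]
        constructor
        · rintro ⟨L', h1, h2⟩; exact ⟨L', Or.inr h1, h2⟩
        · rintro ⟨L', h1, h2⟩
          rcases h1 with rfl | h1
          · exact absurd h2.2 he
          · exact ⟨L', h1, h2⟩

-- xs[1:-1] is tail-then-dropLast
lemma slice_one_neg_one (xs : List Char) :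
    PySem.List.slice xs (some 1) (some (-1)) = xs.tail.dropLast := by
  cases xs with
  | nil => rfl
  | cons a t =>
    simp [PySem.List.slice, PySem.List.clampIdx, List.dropLast_eq_take, List.tail]
    split <;> omega

-- a word that is a k-fold repetition of its length-L prefix is fixed by rotation by L
lemma rotate_of_rep {cs : List Char} {L : ℕ} (hL : 1 ≤ L) (hdvd : L ∣ cs.length)
    (hrep : (List.replicate (cs.length / L) (cs.take L)).flatten = cs) :
    cs.rotate L = cs := by
  rcases Nat.eq_zero_or_pos cs.length with h0 | hpos
  · rw [List.length_eq_zero_iff] at h0; subst h0; simp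
  have hLn : L ≤ cs.length := Nat.le_of_dvd hpos hdvd
  have hk : 1 ≤ cs.length / L := Nat.one_le_div_iff (by omega) |>.mpr hLn
  set t := cs.take L with ht
  set k := cs.length / L with hk'
  have htlen : t.length = L := by simp [ht]; omega
  -- cs = t ++ flatten (replicate (k-1) t)
  have hcs : cs = t ++ (List.replicate (k - 1) t).flatten := by
    conv_lhs => rw [← hrep]
    rw [show k = (k-1) + 1 from by omega, List.replicate_succ, List.flatten_cons]
    simp
  rw [List.rotate_eq_drop_append_take hLn]
  have hdrop : cs.drop L = (List.replicate (k - 1) t).flatten := by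
    conv_lhs => rw [hcs]
    rw [← htlen, List.drop_left]
  have htake : cs.take L = t := ht.symm
  rw [hdrop, htake, ← List.flatten_concat, ← List.replicate_succ']
  rw [show k - 1 + 1 = k from by omega, hrep]

-- a period dividing the length makes the word a repetition of its prefix
lemma rep_of_hasPeriod (g : ℕ) (hg : 1 ≤ g) : ∀ (m : ℕ) (cs : List Char), cs.length = m →
    cs.HasPeriod g → g ∣ m →
    (List.replicate (m / g) (cs.take g)).flatten = cs := by
  intro m
  induction m using Nat.strong_induction_on with
  | _ m ih =>
    intro cs hlen hper hdvd
    rcases Nat.eq_zero_or_pos m with rfl | hpos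
    · rw [List.length_eq_zero_iff] at hlen; subst hlen; simp
    have hgm : g ≤ m := Nat.le_of_dvd hpos hdvd
    have hsplit : cs.take g ++ cs.drop g = cs := List.take_append_drop g cs
    have hperd : (cs.drop g).HasPeriod g := by
      have : ((cs.take g) ++ (cs.drop g) ++ []).HasPeriod g := by
        rw [List.append_nil, hsplit]; exact hper
      exact this.factor
    have hdvd' : g ∣ m - g := (Nat.dvd_sub hdvd dvd_rfl)
    have hlend : (cs.drop g).length = m - g := by simp [hlen]
    have hpre : cs.drop g <+: cs := hper.drop_prefix g
    rcases Nat.lt_or_ge (m - g) g with hsmall | hbig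
    · -- m = g
      have hmg : m = g := by
        rcases hdvd' with ⟨c, hc⟩
        rcases c with _ | c
        · omega
        · exfalso; nlinarith [hc]
      subst hmg
      have : cs.take m = cs := List.take_of_length_le (by omega)
      simp [Nat.div_self (by omega : 0 < m), this]
    · -- take g (drop g cs) = take g cs
      obtain ⟨tail2, htail2⟩ := hpre
      have htg : (cs.drop g).take g = cs.take g := by
        conv_rhs => rw [← htail2]
        rw [List.take_append_of_le_length (by omega)]
      have ihd := ih (m - g) (by omega) (cs.drop g) hlend hperd hdvd'
      rw [htg] at ihd
      have hq : m / g = (m - g) / g + 1 := by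
        rcases hdvd with ⟨c, rfl⟩
        have h2 : g * c - g = g * (c - 1) := by rw [Nat.mul_sub]; omega
        have hc1 : 1 ≤ c := by
          rcases Nat.eq_zero_or_pos c with rfl | h
          · simp at hpos
          · exact h
        rw [h2, Nat.mul_div_cancel_left _ (by omega : 0 < g),
          Nat.mul_div_cancel_left _ (by omega : 0 < g)]
        omega
      rw [hq, List.replicate_succ, List.flatten_cons, ihd, hsplit]

-- the core equivalence on the character list: periodic iff infix of the doubled word
lemma key_fwd (cs : List Char) (h : cs ≠ [])
    (hx : ∃ L : ℕ, 1 ≤ L ∧ L ≤ cs.length / 2 ∧ L ∣ cs.length ∧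
        (List.replicate (cs.length / L) (cs.take L)).flatten = cs) :
    cs <:+: (cs ++ cs).tail.dropLast := by
  obtain ⟨L, hL1, hL2, hdvd, hrep⟩ := hx
  have hn : 1 ≤ cs.length := List.length_pos_iff.mpr h
  have hL2' : L * 2 ≤ cs.length := (Nat.le_div_iff_mul_le (by norm_num)).mp hL2
  have hLn : L ≤ cs.length := by omega
  have hrot := rotate_of_rep hL1 hdvd hrep
  rw [List.rotate_eq_drop_append_take hLn] at hrot
  obtain ⟨a, u, hau⟩ := List.exists_cons_of_ne_nil
    (show cs.take L ≠ [] by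
      intro hnil
      have hlen0 : (cs.take L).length = 0 := by rw [hnil]; rfl
      rw [List.length_take] at hlen0
      omega)
  rcases List.eq_nil_or_concat (cs.drop L) with hvb | ⟨v, b, hvb⟩
  · rw [List.drop_eq_nil_iff] at hvb
    omega
  have h1 : cs.take L ++ (cs ++ cs.drop L) = cs ++ cs := by
    have h0 : cs.take L ++ ((cs.drop L ++ cs.take L) ++ cs.drop L) = cs ++ cs := by
      simp only [← List.append_assoc]
      rw [List.take_append_drop, List.append_assoc, List.take_append_drop]
    rw [hrot] at h0
    exact h0
  have h2 : cs ++ cs = a :: (u ++ (cs ++ (v ++ [b]))) := by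
    rw [← h1, hau, hvb]
    simp [List.concat_eq_append]
  refine ⟨u, v, ?_⟩
  rw [h2]
  simp only [List.tail_cons]
  simp only [← List.append_assoc]
  rw [List.dropLast_concat]

lemma key_bwd (cs : List Char) (h : cs ≠ [])
    (hinf : cs <:+: (cs ++ cs).tail.dropLast) :
    ∃ L : ℕ, 1 ≤ L ∧ L ≤ cs.length / 2 ∧ L ∣ cs.length ∧
        (List.replicate (cs.length / L) (cs.take L)).flatten = cs := by
  obtain ⟨u, v, huv⟩ := hinf
  have hn : 1 ≤ cs.length := List.length_pos_iff.mpr h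
  have hD : ∃ c z, cs ++ cs = c :: ((u ++ (cs ++ v)) ++ [z]) := by
    obtain ⟨c, cs', rfl⟩ := List.exists_cons_of_ne_nil h
    have htail : ((c :: cs') ++ (c :: cs')).tail = cs' ++ c :: cs' := by simp
    rcases List.eq_nil_or_concat (cs' ++ c :: cs') with habs | ⟨ys, zc, hys⟩
    · exact absurd habs (by simp)
    refine ⟨c, zc, ?_⟩
    rw [List.concat_eq_append] at hys
    rw [htail] at huv
    rw [hys, List.dropLast_concat] at huv
    have hcc : (c :: cs') ++ (c :: cs') = c :: (cs' ++ c :: cs') := by simp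
    rw [hcc, hys, ← huv]
    simp [List.append_assoc]
  obtain ⟨c, z, hfull⟩ := hD
  have hlen : u.length + cs.length + v.length = 2 * cs.length - 2 := by
    have := congrArg List.length hfull
    simp at this
    omega
  have hjn : u.length + 1 ≤ cs.length - 1 := by omega
  -- rotation by u.length + 1 fixes cs
  have h2 : (cs ++ cs).drop (u.length + 1) = cs ++ (v ++ [z]) := by
    rw [hfull]
    have hre : c :: ((u ++ (cs ++ v)) ++ [z]) = (c :: u) ++ (cs ++ (v ++ [z])) := by
      simp [List.append_assoc]
    rw [hre]
    exact List.drop_left' (by simp)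
  have h3 : (cs ++ cs).drop (u.length + 1) = cs.drop (u.length + 1) ++ cs := by
    rw [List.drop_append, show u.length + 1 - cs.length = 0 from by omega,
      List.drop_zero]
  have heq : cs.drop (u.length + 1) ++ cs = cs ++ (v ++ [z]) := by rw [← h3, h2]
  have hrotj : cs.drop (u.length + 1) ++ cs.take (u.length + 1) = cs := by
    have h4 := congrArg (List.take cs.length) heq
    rw [List.take_append, List.take_of_length_le (by simp),
      List.take_left' rfl] at h4
    rw [show cs.length - (cs.drop (u.length + 1)).length = u.length + 1 from by
      simp; omega] at h4
    exact h4
  have hswap : cs.take (u.length + 1) ++ cs = cs ++ cs.take (u.length + 1) := by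
    have h5 : cs.take (u.length + 1) ++ (cs.drop (u.length + 1) ++ cs.take (u.length + 1))
        = cs ++ cs.take (u.length + 1) := by
      rw [← List.append_assoc, List.take_append_drop]
    rw [hrotj] at h5
    exact h5
  have hperj : (cs ++ cs.take (u.length + 1)).HasPeriod (u.length + 1) := by
    rw [List.HasPeriod]
    rw [List.take_append_of_le_length (by omega)]
    have h6 : cs.take (u.length + 1) ++ (cs ++ cs.take (u.length + 1))
        = (cs ++ cs.take (u.length + 1)) ++ cs.take (u.length + 1) := by
      rw [← List.append_assoc, hswap]
    rw [h6]
    exact List.prefix_append _ _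
  have hpern : (cs ++ cs.take (u.length + 1)).HasPeriod cs.length := by
    rw [List.HasPeriod]
    rw [List.take_left' rfl]
    exact (List.prefix_append_right_inj cs).mpr
      ((List.take_prefix _ _).trans (List.prefix_append _ _))
  have hlenw : (u.length + 1) + cs.length - Nat.gcd (u.length + 1) cs.length
      ≤ (cs ++ cs.take (u.length + 1)).length := by
    have : (cs ++ cs.take (u.length + 1)).length = cs.length + (u.length + 1) := by
      simp
      omega
    omega
  have hgcd := hperj.gcd hpern hlenw
  have hpercs : cs.HasPeriod (Nat.gcd (u.length + 1) cs.length) := by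
    have h7 : (([] : List Char) ++ cs ++ cs.take (u.length + 1)).HasPeriod
        (Nat.gcd (u.length + 1) cs.length) := by simpa using hgcd
    exact h7.factor
  have hg1 : 1 ≤ Nat.gcd (u.length + 1) cs.length :=
    Nat.gcd_pos_of_pos_left _ (by omega)
  have hgdvdn : Nat.gcd (u.length + 1) cs.length ∣ cs.length := Nat.gcd_dvd_right _ _
  have hgj : Nat.gcd (u.length + 1) cs.length ≤ u.length + 1 :=
    Nat.le_of_dvd (by omega) (Nat.gcd_dvd_left _ _)
  have hghalf : Nat.gcd (u.length + 1) cs.length ≤ cs.length / 2 := by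
    obtain ⟨m, hm⟩ := hgdvdn
    have hm2 : 2 ≤ m := by
      rcases m with _ | _ | m
      · rw [Nat.mul_zero] at hm; omega
      · rw [Nat.mul_one] at hm; omega
      · omega
    have hmul : Nat.gcd (u.length + 1) cs.length * 2 ≤ cs.length :=
      le_trans (Nat.mul_le_mul_left _ hm2) (le_of_eq hm.symm)
    omega
  exact ⟨Nat.gcd (u.length + 1) cs.length, hg1, hghalf, hgdvdn,
    rep_of_hasPeriod _ hg1 cs.length cs rfl hpercs hgdvdn⟩

-- the Int-existential over candidate lengths matches the Nat-existential
-- the Int-existential over candidate lengths matches the Nat-existential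
lemma exists_len_iff (s : String) :
    (∃ L ∈ PySem.List.pyRange 1 (PySem.Int.floordiv (PySem.Str.len s) 2 + 1) 1,
        PySem.Int.mod (PySem.Str.len s) L = 0 ∧
        pyStrMul (PySem.Str.slice s none (some L))
          (PySem.Int.floordiv (PySem.Str.len s) L) = s) ↔
      (∃ L : ℕ, 1 ≤ L ∧ L ≤ s.toList.length / 2 ∧ L ∣ s.toList.length ∧
        (List.replicate (s.toList.length / L) (s.toList.take L)).flatten = s.toList) := by
  have hlen : PySem.Str.len s = (s.toList.length : Int) := PySem.Str.len_eq s
  constructor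
  · rintro ⟨L, hmem, hmod, heq⟩
    rw [PySem.List.mem_pyRange_one, hlen] at hmem
    obtain ⟨h1, h2⟩ := hmem
    have hL : L = ((L.toNat : ℕ) : Int) := (Int.toNat_of_nonneg (by omega)).symm
    have hdiv2 : PySem.Int.floordiv ((s.toList.length : ℕ) : Int) 2
        = ((s.toList.length / 2 : ℕ) : Int) := by
      exact_mod_cast PySem.Int.floordiv_natCast s.toList.length 2
    rw [hdiv2] at h2
    refine ⟨L.toNat, by omega, by omega, ?_, ?_⟩
    · rw [hlen, PySem.Int.mod_eq_zero_iff_dvd, hL] at hmod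
      exact_mod_cast hmod
    · rw [String.ext_iff] at heq
      have hA : (PySem.Str.slice s none (some L)).toList = s.toList.take L.toNat := by
        rw [PySem.Str.toList_slice]
        exact PySem.List.slice_to s.toList (by omega)
      have hB : PySem.Int.floordiv (PySem.Str.len s) L
          = ((s.toList.length / L.toNat : ℕ) : Int) := by
        conv_lhs => rw [hlen, hL]
        exact PySem.Int.floordiv_natCast _ _
      conv_rhs => rw [← heq]
      simp only [pyStrMul, String.toList_ofList, hA, hB, Int.toNat_natCast]
  · rintro ⟨L, h1, h2, hdvd, hrep⟩
    refine ⟨(L : Int), ?_, ?_, ?_⟩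
    · rw [PySem.List.mem_pyRange_one, hlen]
      have hdiv2 : PySem.Int.floordiv ((s.toList.length : ℕ) : Int) 2
          = ((s.toList.length / 2 : ℕ) : Int) := by
        exact_mod_cast PySem.Int.floordiv_natCast s.toList.length 2
      rw [hdiv2]
      omega
    · rw [hlen, PySem.Int.mod_eq_zero_iff_dvd]
      exact_mod_cast hdvd
    · rw [String.ext_iff]
      have hA : (PySem.Str.slice s none (some (L : Int))).toList = s.toList.take L := by
        rw [PySem.Str.toList_slice]
        rw [show PySem.Chars.slice s.toList none (some (L : Int))
            = PySem.List.slice s.toList none (some (L : Int)) from rfl]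
        rw [PySem.List.slice_to s.toList (by omega)]
        simp
      have hB : PySem.Int.floordiv (PySem.Str.len s) (L : Int)
          = ((s.toList.length / L : ℕ) : Int) := by
        conv_lhs => rw [hlen]
        exact PySem.Int.floordiv_natCast _ _
      simp only [pyStrMul, String.toList_ofList, hA, hB, Int.toNat_natCast]
      exact hrep

-- per-id: A's inner test equals B's doubled-string test
lemma test_eq (id : Int) :
    processInner (PySem.Int.toStr id) (PySem.Str.len (PySem.Int.toStr id))
        (PySem.List.pyRange 1 (PySem.Int.floordiv (PySem.Str.len (PySem.Int.toStr id)) 2 + 1) 1)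
      = PySem.Str.isIn (PySem.Int.toStr id)
          (PySem.Str.slice (PySem.Int.toStr id ++ PySem.Int.toStr id) (some 1) (some (-1))) := by
  rw [Bool.eq_iff_iff, processInner_iff, PySem.Str.isIn_iff_infix]
  have hne : (PySem.Int.toStr id).toList ≠ [] := by
    rw [PySem.Int.toList_toStr]
    exact toChars_ne_nil id
  have hsl : (PySem.Str.slice (PySem.Int.toStr id ++ PySem.Int.toStr id)
        (some 1) (some (-1))).toList
      = ((PySem.Int.toStr id).toList ++ (PySem.Int.toStr id).toList).tail.dropLast := by
    rw [PySem.Str.toList_slice, String.toList_append]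
    exact slice_one_neg_one _
  rw [hsl, exists_len_iff]
  exact ⟨key_fwd _ hne, key_bwd _ hne⟩

-- the two folds agree element by element
lemma process_foldl_congr : ∀ (l : List Int) (acc : List Int),
    l.foldl (fun wrong_ids id =>
      let id_str := PySem.Int.toStr id
      let str_length := PySem.Str.len id_str
      if processInner id_str str_length
           (PySem.List.pyRange 1 (PySem.Int.floordiv str_length 2 + 1) 1)
      then wrong_ids ++ [id] else wrong_ids) acc
    = l.foldl (fun wrong_ids id =>
      let id_str := PySem.Int.toStr id
      if PySem.Str.isIn id_str (PySem.Str.slice (id_str ++ id_str) (some 1) (some (-1)))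
      then wrong_ids ++ [id] else wrong_ids) acc := by
  intro l
  induction l with
  | nil => intro acc; simp only [List.foldl_nil]
  | cons x rest ih =>
    intro acc
    simp only [List.foldl_cons]
    have h : (let id_str := PySem.Int.toStr x
        let str_length := PySem.Str.len id_str
        if processInner id_str str_length
             (PySem.List.pyRange 1 (PySem.Int.floordiv str_length 2 + 1) 1)
        then acc ++ [x] else acc)
      = (let id_str := PySem.Int.toStr x
        if PySem.Str.isIn id_str (PySem.Str.slice (id_str ++ id_str) (some 1) (some (-1)))
        then acc ++ [x] else acc) := by
      show (if processInner (PySem.Int.toStr x) (PySem.Str.len (PySem.Int.toStr x))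
             (PySem.List.pyRange 1 (PySem.Int.floordiv (PySem.Str.len (PySem.Int.toStr x)) 2 + 1) 1)
        then acc ++ [x] else acc)
        = (if PySem.Str.isIn (PySem.Int.toStr x)
              (PySem.Str.slice (PySem.Int.toStr x ++ PySem.Int.toStr x) (some 1) (some (-1)))
        then acc ++ [x] else acc)
      rw [test_eq x]
    rw [h]
    exact ih _

-- ===== VERDICT (by name: the statement is the Claim_ definition above) =====
theorem process_spec : Claim_equal_process := by
  intro id_range _
  unfold Spec_process process process_alt
  exact process_foldl_congr _ _
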